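-- pv_equiv track=rewrite | github.com/emiliewz/leetcode | Greedy/1616.py | checkPalindromeFormation
-- ===== SOURCE A (Python) =====
-- def checkPalindromeFormation(a: str, b: str) -> bool:
--     n = len(a)
--     l, r = 0, n - 1
--     while l < r:
--         if a[l] == b[r]:
--             l += 1
--             r -= 1
--         else:
--             break
--     s1, s2 = a[l : r + 1], b[l : r + 1]
--     l, r = 0, n - 1
--     while l < r:
--         if b[l] == a[r]:
--             l += 1
--             r -= 1
--         else:
--             break
--     s3, s4 = a[l : r + 1], b[l : r + 1]
--     return any(s == s[::-1] for s in (s1, s2, s3, s4))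
-- ===== SOURCE B (Python) =====
-- def _pal(s):
--     return s == s[::-1]
--
--
-- def checkPalindromeFormation(a: str, b: str) -> bool:
--     n = len(a)
--     return any(_pal(a[:i] + b[i:n]) or _pal(b[:i] + a[i:n])
--                for i in range(n + 1))
-- ===== Notes on version B (the rewrite author's own statement) =====
-- stated objective: alternative
-- what changed: Replaces A's greedy two-pointer prefix/suffix matching and four middle-substring palindrome tests by an exhaustive scan over all n+1 cut points, directly testing each candidate concatenation a[:i]+b[i:n] and b[:i]+a[i:n] for palindromicity; trades A's O(n) time for directness (correct because a cut works iff the greedily matched middle of a or b is a palindrome).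
import Mathlib
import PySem

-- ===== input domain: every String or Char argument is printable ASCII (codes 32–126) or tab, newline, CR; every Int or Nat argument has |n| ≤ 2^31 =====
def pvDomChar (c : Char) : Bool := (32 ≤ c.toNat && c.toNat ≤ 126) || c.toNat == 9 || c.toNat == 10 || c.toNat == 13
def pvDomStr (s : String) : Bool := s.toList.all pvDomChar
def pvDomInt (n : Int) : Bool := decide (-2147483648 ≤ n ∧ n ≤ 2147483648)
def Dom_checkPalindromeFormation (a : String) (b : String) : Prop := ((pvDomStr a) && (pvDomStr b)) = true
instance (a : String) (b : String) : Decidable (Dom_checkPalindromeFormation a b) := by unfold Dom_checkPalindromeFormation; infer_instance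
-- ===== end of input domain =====

-- B replaces A's greedy two-pointer prefix matching by an exhaustive scan over all n+1
-- cut points, testing each candidate concatenation for palindromicity directly (alternative
-- algorithm; O(n^2) instead of O(n), chosen for directness).

-- ===== PORT A =====
-- A's while loop 'while l < r: if x[l] == y[r]: l += 1; r -= 1 else: break'.
-- Indexing is via pyGet? with a default; under Pre_ every index visited is in range (exact there).
def pvLoopA (x y : List Char) (l r : Int) : Int × Int :=
  if l < r then
    if (PySem.List.pyGet? x l).getD ' ' == (PySem.List.pyGet? y r).getD ' ' then
      pvLoopA x y (l + 1) (r - 1)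
    else (l, r)
  else (l, r)
termination_by (r - l).toNat
decreasing_by omega

def checkPalindromeFormation (a : String) (b : String) : Bool :=
  let n : Int := a.toList.length
  let p1 := pvLoopA a.toList b.toList 0 (n - 1)
  let s1 := PySem.List.slice a.toList (some p1.1) (some (p1.2 + 1))
  let s2 := PySem.List.slice b.toList (some p1.1) (some (p1.2 + 1))
  let p2 := pvLoopA b.toList a.toList 0 (n - 1)
  let s3 := PySem.List.slice a.toList (some p2.1) (some (p2.2 + 1))
  let s4 := PySem.List.slice b.toList (some p2.1) (some (p2.2 + 1))
  (s1 == s1.reverse) || (s2 == s2.reverse) || (s3 == s3.reverse) || (s4 == s4.reverse)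

-- ===== PORT B =====
-- _pal(s): s == s[::-1]; s[::-1] is list reversal (PySem.List.slice?_none_none_neg_one).
def pvPal (s : List Char) : Bool := s == s.reverse

-- any(_pal(a[:i] + b[i:n]) or _pal(b[:i] + a[i:n]) for i in range(n + 1))
def checkPalindromeFormation_alt (a : String) (b : String) : Bool :=
  let x := a.toList
  let y := b.toList
  let n : Int := x.length
  (PySem.List.pyRange 0 (n + 1) 1).any (fun i =>
    pvPal (PySem.List.slice x none (some i) ++ PySem.List.slice y (some i) (some n)) ||
    pvPal (PySem.List.slice y none (some i) ++ PySem.List.slice x (some i) (some n)))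

-- ===== PRECONDITION & SPEC =====
-- Pre_ excludes exactly the inputs where A raises IndexError (len(a) ≥ 2 and len(b) < len(a):
-- the first comparison b[len(a)-1] is out of range); B returns normally there (its slices never raise).
def Pre_checkPalindromeFormation (a : String) (b : String) : Prop :=
  a.toList.length ≤ 1 ∨ a.toList.length ≤ b.toList.length
instance (a : String) (b : String) : Decidable (Pre_checkPalindromeFormation a b) := by unfold Pre_checkPalindromeFormation; infer_instance

def pvWitness_checkPalindromeFormation : String × String := ("abdea", "aceaa")

def Spec_checkPalindromeFormation (a : String) (b : String) (out : Bool) : Prop := out = checkPalindromeFormation_alt a b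
instance (a : String) (b : String) (out : Bool) : Decidable (Spec_checkPalindromeFormation a b out) := by unfold Spec_checkPalindromeFormation; infer_instance

-- ===== CLAIM (what is proved, stated in full; the proofs are below) =====
def Claim_equal_checkPalindromeFormation : Prop := ∀ (a : String) (b : String), Dom_checkPalindromeFormation a b → Pre_checkPalindromeFormation a b → Spec_checkPalindromeFormation a b (checkPalindromeFormation a b)

-- ===== LEMMAS AND PROOFS =====

-- Abstract middle-palindrome predicate: chars l..(n-1-l) of h mirror around (n-1)/2.
def PalF (h : Nat → Char) (l n : Nat) : Prop :=
  ∀ j, l ≤ j → j + l + 1 ≤ n → h j = h (n - 1 - j)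

-- Abstract "cut at i works" predicate: f-prefix + g-suffix of length n is a palindrome.
def CutOK (f g : Nat → Char) (n i : Nat) : Prop :=
  ∀ j, j < n → (if j < i then f j else g j) = (if n - 1 - j < i then f (n - 1 - j) else g (n - 1 - j))

-- CORE: greedy stop L (maximal matched prefix, mismatch-or-crossed) makes "middle of f or g
-- is a palindrome" equivalent to "some cut works".
theorem core_iff (f g : Nat → Char) (n L : Nat) (hL : 2 * L ≤ n)
    (hmatch : ∀ j, j < L → f j = g (n - 1 - j))
    (hstop : 2 * L + 1 < n → f L ≠ g (n - 1 - L)) :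
    (PalF f L n ∨ PalF g L n) ↔ ∃ i, i ≤ n ∧ CutOK f g n i := by
  constructor
  · rintro (hf | hg)
    · refine ⟨n - L, by omega, ?_⟩
      intro j hj
      by_cases h1 : j < L
      · rw [if_pos (by omega), if_neg (by omega)]
        exact hmatch j h1
      · by_cases h2 : n - 1 - j < L
        · rw [if_neg (by omega), if_pos (by omega)]
          have := hmatch (n - 1 - j) h2
          rw [this]; congr 1; omega
        · rw [if_pos (by omega), if_pos (by omega)]
          exact hf j (by omega) (by omega)
    · refine ⟨L, by omega, ?_⟩
      intro j hj
      by_cases h1 : j < L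
      · rw [if_pos h1, if_neg (by omega)]
        exact hmatch j h1
      · by_cases h2 : n - 1 - j < L
        · rw [if_neg h1, if_pos h2]
          have := hmatch (n - 1 - j) h2
          rw [this]; congr 1; omega
        · rw [if_neg h1, if_neg h2]
          exact hg j (by omega) (by omega)
  · rintro ⟨i, hi, hcut⟩
    by_cases hio : i ≤ n - i
    · -- m = i : matched prefix of length i, middle of g is a palindrome
      have hm : ∀ j, j < i → f j = g (n - 1 - j) := by
        intro j hj
        have h := hcut j (by omega)
        rwa [if_pos hj, if_neg (by omega)] at h
      have hLm : i ≤ L := by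
        by_contra h
        exact hstop (by omega) (hm L (by omega))
      right
      intro j hjL hjn
      have h := hcut j (by omega)
      rwa [if_neg (by omega), if_neg (by omega)] at h
    · -- m = n - i : matched prefix of length n - i, middle of f is a palindrome
      have hm : ∀ j, j < n - i → f j = g (n - 1 - j) := by
        intro j hj
        have h := hcut j (by omega)
        rwa [if_pos (by omega), if_neg (by omega)] at h
      have hLm : n - i ≤ L := by
        by_contra h
        exact hstop (by omega) (hm L (by omega))
      left
      intro j hjL hjn
      have h := hcut j (by omega)
      rwa [if_pos (by omega), if_pos (by omega)] at h

-- Loop invariants for A's pointer loop: pointer sum preserved, matched below the stop,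
-- mismatch at the stop while not crossed.
theorem pvLoopA_spec (x y : List Char) (l r : Int) :
    (pvLoopA x y l r).1 + (pvLoopA x y l r).2 = l + r ∧
    l ≤ (pvLoopA x y l r).1 ∧
    (∀ j : Int, l ≤ j → j < (pvLoopA x y l r).1 →
      (PySem.List.pyGet? x j).getD ' ' = (PySem.List.pyGet? y (l + r - j)).getD ' ') ∧
    ((pvLoopA x y l r).1 < (pvLoopA x y l r).2 →
      (PySem.List.pyGet? x (pvLoopA x y l r).1).getD ' ' ≠ (PySem.List.pyGet? y (pvLoopA x y l r).2).getD ' ') := by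
  fun_induction pvLoopA x y l r with
  | case1 l r h hc ih =>
    obtain ⟨s1, s2, s3, s4⟩ := ih
    refine ⟨by omega, by omega, ?_, s4⟩
    intro j hj1 hj2
    rcases eq_or_lt_of_le hj1 with rfl | hlt
    · have : l + r - l = r := by omega
      rw [this]; exact beq_iff_eq.mp hc
    · have := s3 j (by omega) hj2
      rwa [show l + 1 + (r - 1) - j = l + r - j by omega] at this
  | case2 l r h hc =>
    exact ⟨rfl, le_refl _, fun j hj1 hj2 => by omega, fun _ => by simpa using hc⟩
  | case3 l r h =>
    exact ⟨rfl, le_refl _, fun j hj1 hj2 => by omega, fun hlr => absurd hlr h⟩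

-- crossing bound: the stop pointers cross by at most one (l-1 ≤ r preserved).
theorem pvLoopA_bounds (x y : List Char) (l r : Int) :
    (pvLoopA x y l r).2 ≤ r ∧ (l - 1 ≤ r → (pvLoopA x y l r).1 - 1 ≤ (pvLoopA x y l r).2) := by
  fun_induction pvLoopA x y l r with
  | case1 l r h hc ih => exact ⟨by omega, fun _ => ih.2 (by omega)⟩
  | case2 l r h hc => exact ⟨by omega, fun _ => by omega⟩
  | case3 l r h => exact ⟨by omega, fun hh => by omega⟩

-- Nat-cast indexing: Python s[j] for a natural j is List.getD.
theorem pyGetD_nat (s : List Char) (j : Nat) :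
    (PySem.List.pyGet? s (j : Int)).getD ' ' = s.getD j ' ' := by
  simp [PySem.List.pyGet?_natCast, List.getD]

-- A list of length ≤ 1 equals its reverse.
theorem pal_short (s : List Char) (h : s.length ≤ 1) : (s == s.reverse) = true := by
  match s, h with
  | [], _ => rfl
  | [c], _ => simp

-- Segment palindromicity: s[l : n-l] equals its reverse iff chars l..(n-1-l) mirror.
theorem seg_pal_iff (s : List Char) (l n : Nat) (h2 : 2 * l ≤ n) (hs : n ≤ s.length) :
    ((s.drop l).take (n - 2 * l) == ((s.drop l).take (n - 2 * l)).reverse) = true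
      ↔ PalF (fun j => s.getD j ' ') l n := by
  have hlen : ((s.drop l).take (n - 2 * l)).length = n - 2 * l := by
    simp [List.length_take, List.length_drop]; omega
  rw [beq_iff_eq]
  constructor
  · intro h j hjl hjn
    have ht : j - l < n - 2 * l := by omega
    have e := congrArg (fun u => u[j - l]?) h
    simp only [List.getElem?_reverse (by omega : j - l < ((s.drop l).take (n - 2*l)).length), hlen] at e
    rw [List.getElem?_take_of_lt ht, List.getElem?_take_of_lt (by omega), List.getElem?_drop, List.getElem?_drop] at e
    have e1 : l + (j - l) = j := by omega
    have e2 : l + (n - 2 * l - 1 - (j - l)) = n - 1 - j := by omega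
    rw [e1, e2] at e
    have hj1 : j < s.length := by omega
    have hj2 : n - 1 - j < s.length := by omega
    simp only [List.getD, List.getElem?_eq_getElem hj1, List.getElem?_eq_getElem hj2]
    simpa [List.getElem?_eq_getElem hj1, List.getElem?_eq_getElem hj2] using e
  · intro hp
    apply List.ext_getElem (by simp [hlen])
    intro t h1 h2'
    rw [List.getElem_reverse]
    simp only [hlen] at h1 ⊢
    rw [List.getElem_take, List.getElem_take, List.getElem_drop, List.getElem_drop]
    have := hp (l + t) (by omega) (by omega)
    have e2 : n - 1 - (l + t) = l + (n - 2 * l - 1 - t) := by omega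
    rw [e2] at this
    have hj1 : l + t < s.length := by omega
    have hj2 : l + (n - 2 * l - 1 - t) < s.length := by omega
    simpa [List.getD, List.getElem?_eq_getElem hj1, List.getElem?_eq_getElem hj2] using this
  
-- Cut palindromicity: x[:i] ++ y[i:n] equals its reverse iff the cut condition holds.
theorem cut_pal_iff (x y : List Char) (n i : Nat) (hx : n ≤ x.length) (hi : i ≤ n)
    (hy : n ≤ y.length) :
    ((x.take i ++ (y.drop i).take (n - i)) == (x.take i ++ (y.drop i).take (n - i)).reverse) = true
      ↔ CutOK (fun j => x.getD j ' ') (fun j => y.getD j ' ') n i := by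
  set z := x.take i ++ (y.drop i).take (n - i) with hz
  have hzlen : z.length = n := by
    simp [hz, List.length_take, List.length_drop]; omega
  have hzget : ∀ j, j < n → z.getD j ' ' = if j < i then x.getD j ' ' else y.getD j ' ' := by
    intro j hj
    by_cases hji : j < i
    · rw [if_pos hji]
      have : z[j]? = x[j]? := by
        rw [hz, List.getElem?_append_left (by simp [List.length_take]; omega),
            List.getElem?_take_of_lt hji]
      simp [List.getD, this]
    · rw [if_neg hji]
      have hxi : (x.take i).length = i := by simp [List.length_take]; omega
      have : z[j]? = y[j]? := by
        rw [hz, List.getElem?_append_right (by omega), hxi,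
            List.getElem?_take_of_lt (by omega), List.getElem?_drop]
        congr 1; omega
      simp [List.getD, this]
  rw [beq_iff_eq]
  constructor
  · intro h j hj
    have e := congrArg (fun u => u[j]?) h
    simp only [List.getElem?_reverse (by omega : j < z.length), hzlen] at e
    have d1 : z[j]? = some (z.getD j ' ') := by
      simp [List.getD, List.getElem?_eq_getElem (by omega : j < z.length)]
    have d2 : z[n - 1 - j]? = some (z.getD (n - 1 - j) ' ') := by
      simp [List.getD, List.getElem?_eq_getElem (by omega : n - 1 - j < z.length)]
    rw [d1, d2] at e
    have := Option.some.inj e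
    rwa [hzget j hj, hzget (n - 1 - j) (by omega)] at this
  · intro hc
    apply List.ext_getElem (by simp [hzlen])
    intro t h1 h2'
    rw [List.getElem_reverse]
    simp only [hzlen] at h1 ⊢
    have d1 : z[t] = z.getD t ' ' := by
      simp [List.getD, List.getElem?_eq_getElem (by omega : t < z.length)]
    have d2 : z[n - 1 - t] = z.getD (n - 1 - t) ' ' := by
      simp [List.getD, List.getElem?_eq_getElem (by omega : n - 1 - t < z.length)]
    rw [d1, d2, hzget t h1, hzget (n - 1 - t) (by omega)]
    exact hc t h1

-- One orientation packaged: greedy loop result ⟹ (A's two middle tests ⟺ some cut works).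
theorem orient_iff (x y : List Char) (n : Nat) (hx : n ≤ x.length) (hy : n ≤ y.length)
    (hn : 2 ≤ n) (p : Int × Int) (hpdef : p = pvLoopA x y 0 ((n : Int) - 1)) :
    ((PySem.List.slice x (some p.1) (some (p.2 + 1))
        == (PySem.List.slice x (some p.1) (some (p.2 + 1))).reverse) = true
      ∨ (PySem.List.slice y (some p.1) (some (p.2 + 1))
        == (PySem.List.slice y (some p.1) (some (p.2 + 1))).reverse) = true)
    ↔ ∃ i, i ≤ n ∧ CutOK (fun j => x.getD j ' ') (fun j => y.getD j ' ') n i := by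
  obtain ⟨hsum, hge, hmatchI, hstopI⟩ := pvLoopA_spec x y 0 ((n : Int) - 1)
  obtain ⟨hr2, hcross⟩ := pvLoopA_bounds x y 0 ((n : Int) - 1)
  rw [← hpdef] at hsum hge hmatchI hstopI hr2 hcross
  have hcross' : p.1 - 1 ≤ p.2 := hcross (by omega)
  set L : Nat := p.1.toNat with hL
  have hp1 : p.1 = (L : Int) := by omega
  have h2L : 2 * L ≤ n := by omega
  have hp2 : p.2 = (n : Int) - 1 - L := by omega
  have hmatch : ∀ j, j < L → (fun j => x.getD j ' ') j = (fun j => y.getD j ' ') (n - 1 - j) := by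
    intro j hj
    have := hmatchI (j : Int) (by omega) (by omega)
    rw [show (0 : Int) + ((n : Int) - 1) - j = ((n - 1 - j : Nat) : Int) by omega] at this
    simpa [pyGetD_nat] using this
  have hstop : 2 * L + 1 < n → (fun j => x.getD j ' ') L ≠ (fun j => y.getD j ' ') (n - 1 - L) := by
    intro hlt
    have := hstopI (by omega)
    rw [hp1, hp2, show ((n : Int) - 1 - L) = ((n - 1 - L : Nat) : Int) by omega] at this
    simpa [pyGetD_nat] using this
  have hsl : ∀ s : List Char, PySem.List.slice s (some p.1) (some (p.2 + 1)) = (s.drop L).take (n - 2 * L) := by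
    intro s
    rw [PySem.List.slice_toNat _ (by omega) (by omega)]
    congr 1
    omega
  rw [hsl x, hsl y, seg_pal_iff x L n h2L (by omega), seg_pal_iff y L n h2L hy]
  exact core_iff _ _ n L h2L hmatch hstop

-- ===== VERDICT (by name: the statement is the Claim_ definition above) =====
theorem checkPalindromeFormation_spec : Claim_equal_checkPalindromeFormation := by
  intro a b _ hpre
  unfold Spec_checkPalindromeFormation checkPalindromeFormation checkPalindromeFormation_alt
  unfold Pre_checkPalindromeFormation at hpre
  set x := a.toList with hxdef
  set y := b.toList with hydef
  set n : Nat := x.length with hn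
  rw [Bool.eq_iff_iff]
  by_cases hsmall : n ≤ 1
  · -- n ≤ 1: both sides are true
    have hloop : ∀ u v : List Char, pvLoopA u v 0 ((n : Int) - 1) = (0, (n : Int) - 1) := by
      intro u v; rw [pvLoopA, if_neg (by omega)]
    constructor
    · intro _
      rw [List.any_eq_true]
      refine ⟨0, by rw [PySem.List.mem_pyRange_one]; omega, ?_⟩
      have h1 : PySem.List.slice x none (some 0) = x.take 0 := by
        rw [show (0 : Int) = ((0 : Nat) : Int) from rfl, PySem.List.slice_to_natCast]
      simp only [h1, Bool.or_eq_true]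
      left
      exact pal_short _ (by simp [List.length_take]; omega)
    · intro _
      simp [hloop]
      left; left; left
      rw [hn, List.take_length]
      have hx1 : x.length ≤ 1 := by omega
      match x, hx1 with
      | [], _ => rfl
      | [c], _ => rfl
  · -- n ≥ 2: Pre_ gives n ≤ len(b); greedy ⟺ exhaustive via core_iff, per orientation
    have hxlen : n ≤ x.length := le_of_eq hn
    have hy : n ≤ y.length := by
      rcases hpre with h | h
      · omega
      · exact h
    have hA := orient_iff x y n hxlen hy (by omega) _ rfl
    have hB := orient_iff y x n hy hxlen (by omega) _ rfl
    have hslices : ∀ i : Int, 0 ≤ i → i < (n : Int) + 1 →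
        ((pvPal (PySem.List.slice x none (some i) ++ PySem.List.slice y (some i) (some (n : Int))) ||
          pvPal (PySem.List.slice y none (some i) ++ PySem.List.slice x (some i) (some (n : Int)))) = true
          ↔ (CutOK (fun j => x.getD j ' ') (fun j => y.getD j ' ') n i.toNat ∨
             CutOK (fun j => y.getD j ' ') (fun j => x.getD j ' ') n i.toNat)) := by
      intro i h0 h1
      rw [PySem.List.slice_to x h0, PySem.List.slice_to y h0,
          PySem.List.slice_toNat y h0 (by omega), PySem.List.slice_toNat x h0 (by omega)]
      have hnn : ((n : Int)).toNat = n := by omega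
      rw [hnn]
      unfold pvPal
      rw [Bool.or_eq_true,
          cut_pal_iff x y n i.toNat hxlen (by omega) hy,
          cut_pal_iff y x n i.toNat hy (by omega) hxlen]
    constructor
    · intro hLHS
      rw [List.any_eq_true]
      have hdis : (∃ i, i ≤ n ∧ CutOK (fun j => x.getD j ' ') (fun j => y.getD j ' ') n i) ∨
          (∃ i, i ≤ n ∧ CutOK (fun j => y.getD j ' ') (fun j => x.getD j ' ') n i) := by
        simp only [Bool.or_eq_true] at hLHS
        rcases hLHS with ((h | h) | h) | h
        · exact Or.inl (hA.mp (Or.inl h))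
        · exact Or.inl (hA.mp (Or.inr h))
        · exact Or.inr (hB.mp (Or.inr h))
        · exact Or.inr (hB.mp (Or.inl h))
      rcases hdis with ⟨i, hi, hc⟩ | ⟨i, hi, hc⟩
      · refine ⟨(i : Int), by rw [PySem.List.mem_pyRange_one]; omega, ?_⟩
        refine (hslices (i : Int) (by omega) (by omega)).mpr (Or.inl ?_)
        simpa using hc
      · refine ⟨(i : Int), by rw [PySem.List.mem_pyRange_one]; omega, ?_⟩
        refine (hslices (i : Int) (by omega) (by omega)).mpr (Or.inr ?_)
        simpa using hc
    · intro hRHS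
      rw [List.any_eq_true] at hRHS
      obtain ⟨i, him, hpI⟩ := hRHS
      rw [PySem.List.mem_pyRange_one] at him
      have hcut := (hslices i him.1 (by omega)).mp hpI
      simp only [Bool.or_eq_true]
      rcases hcut with hc | hc
      · rcases hA.mpr ⟨i.toNat, by omega, hc⟩ with h | h
        · exact Or.inl (Or.inl (Or.inl h))
        · exact Or.inl (Or.inl (Or.inr h))
      · rcases hB.mpr ⟨i.toNat, by omega, hc⟩ with h | h
        · exact Or.inr h
        · exact Or.inl (Or.inr h)
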